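-- pv_equiv track=rewrite | github.com/FreckledRam/TheLevs-Project | main.py | count_bad_words
-- ===== SOURCE A (Python) =====
-- def count_bad_words(lyric_list, profane_words):
--     num_words = 0
--     # Normalize profane words for case-insensitive comparison
--     profane_words_set = set(word.lower() for word in profane_words)
--     for line in lyric_list:
--         # Split the line into words, normalize them, and count matches
--         words = line.lower().split()  # Convert to lowercase and split into words
--         for word in words:
--             # Remove punctuation from each word and check if it's profane
--             cleaned_word = word.strip(".,!?;:()\"'")
--             if cleaned_word in profane_words_set:
--                 num_words += 1
--     return num_words
-- ===== SOURCE B (Python) =====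
-- def count_bad_words(lyric_list, profane_words):
--     # Build a frequency table of all cleaned, lowercased words, then sum
--     # the counts of the (deduplicated, lowercased) profane words.
--     freq = {}
--     for line in lyric_list:
--         for word in line.lower().split():
--             cleaned = word.strip(".,!?;:()\"'")
--             freq[cleaned] = freq.get(cleaned, 0) + 1
--     total = 0
--     for w in set(p.lower() for p in profane_words):
--         total += freq.get(w, 0)
--     return total
-- ===== Notes on version B (the rewrite author's own statement) =====
-- stated objective: alternative
-- what changed: B builds a frequency table of all cleaned lowercased words in one pass and then sums counter[w] over the deduplicated profane-word set, instead of testing each word against the set inside the scan.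
import Mathlib
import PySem

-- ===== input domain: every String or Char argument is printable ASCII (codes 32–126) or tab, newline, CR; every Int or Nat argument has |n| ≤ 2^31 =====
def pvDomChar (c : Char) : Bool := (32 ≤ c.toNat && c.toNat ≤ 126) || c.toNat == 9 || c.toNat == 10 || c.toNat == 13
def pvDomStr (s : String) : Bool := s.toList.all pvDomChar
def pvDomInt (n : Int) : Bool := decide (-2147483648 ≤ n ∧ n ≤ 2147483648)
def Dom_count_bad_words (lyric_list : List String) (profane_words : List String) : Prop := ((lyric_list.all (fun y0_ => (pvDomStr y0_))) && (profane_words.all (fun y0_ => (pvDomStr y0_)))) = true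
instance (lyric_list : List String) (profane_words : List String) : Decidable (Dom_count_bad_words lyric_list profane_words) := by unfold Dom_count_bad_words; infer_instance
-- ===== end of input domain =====

-- B replaces A's per-word set-membership scan by a frequency table of all cleaned
-- words plus a final sum over the deduplicated profane set (alternative decomposition,
-- same cost). Equivalence of the return values is proved for all inputs.

-- ===== PORT A =====
def count_bad_words (lyric_list : List String) (profane_words : List String) : Int :=
  let profane_words_set : PySem.Set String :=
    PySem.Set.ofList (profane_words.map (fun word => PySem.Str.lower word))
  lyric_list.foldl (fun num_words line =>
    (PySem.Str.split₀ (PySem.Str.lower line)).foldl (fun n word =>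
      let cleaned := PySem.Str.stripChars word ".,!?;:()\"'"
      if PySem.Set.contains profane_words_set cleaned then n + 1 else n) num_words) 0

-- ===== PORT B =====
def count_bad_words_alt (lyric_list : List String) (profane_words : List String) : Int :=
  let freq : PySem.Dict String Int :=
    lyric_list.foldl (fun freq line =>
      (PySem.Str.split₀ (PySem.Str.lower line)).foldl (fun freq word =>
        let cleaned := PySem.Str.stripChars word ".,!?;:()\"'"
        freq.insert cleaned (freq.getD cleaned 0 + 1)) freq) PySem.Dict.empty
  (PySem.Set.ofList (profane_words.map (fun p => PySem.Str.lower p))).foldl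
    (fun total w => total + freq.getD w 0) 0

-- ===== PRECONDITION & SPEC =====
def Spec_count_bad_words (lyric_list : List String) (profane_words : List String) (out : Int) : Prop := out = count_bad_words_alt lyric_list profane_words
instance (lyric_list : List String) (profane_words : List String) (out : Int) : Decidable (Spec_count_bad_words lyric_list profane_words out) := by unfold Spec_count_bad_words; infer_instance

-- ===== CLAIM (what is proved, stated in full; the proofs are below) =====
def Claim_equal_count_bad_words : Prop := ∀ (lyric_list : List String) (profane_words : List String), Dom_count_bad_words lyric_list profane_words → Spec_count_bad_words lyric_list profane_words (count_bad_words lyric_list profane_words)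

-- ===== LEMMAS AND PROOFS =====

/-- cleaned words of one line (the value both programs test/count) -/
def pvWordsOf (line : String) : List String :=
  (PySem.Str.split₀ (PySem.Str.lower line)).map
    (fun w => PySem.Str.stripChars w ".,!?;:()\"'")

/-- all cleaned words of the whole lyric list -/
def pvAllWords (ls : List String) : List String := ls.flatMap pvWordsOf

/-- A's nested loop counts the cleaned words that lie in the set. -/
theorem pvA_loop (S : PySem.Set String) (ls : List String) (a : Int) :
    ls.foldl (fun num_words line =>
      (PySem.Str.split₀ (PySem.Str.lower line)).foldl (fun n word =>
        let cleaned := PySem.Str.stripChars word ".,!?;:()\"'"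
        if PySem.Set.contains S cleaned then n + 1 else n) num_words) a
    = a + ((pvAllWords ls).countP (fun x => PySem.Set.contains S x) : Int) := by
  induction ls generalizing a with
  | nil => simp [pvAllWords]
  | cons l ls ih =>
    simp only [List.foldl_cons]
    rw [PySem.List.foldl_if_add_one
      (fun word => PySem.Set.contains S (PySem.Str.stripChars word ".,!?;:()\"'")), ih]
    simp [pvAllWords, pvWordsOf, List.countP_map, Function.comp_def]
    ring

/-- B's frequency table holds the multiplicity of each cleaned word. -/
theorem pvB_freq (ls : List String) (d : PySem.Dict String Int) (w : String) :
    (ls.foldl (fun freq line =>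
      (PySem.Str.split₀ (PySem.Str.lower line)).foldl (fun freq word =>
        let cleaned := PySem.Str.stripChars word ".,!?;:()\"'"
        freq.insert cleaned (freq.getD cleaned 0 + 1)) freq) d).getD w 0
    = d.getD w 0 + ((pvAllWords ls).count w : Int) := by
  induction ls generalizing d with
  | nil => simp [pvAllWords]
  | cons l ls ih =>
    simp only [List.foldl_cons]
    rw [ih]
    have hmapin : ∀ (d : PySem.Dict String Int) (ws : List String),
        ws.foldl (fun freq word =>
          let cleaned := PySem.Str.stripChars word ".,!?;:()\"'"
          freq.insert cleaned (freq.getD cleaned 0 + 1)) d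
        = (ws.map (fun w => PySem.Str.stripChars w ".,!?;:()\"'")).foldl
            (fun freq x => freq.insert x (freq.getD x 0 + 1)) d := by
      intro d ws
      rw [List.foldl_map]
    rw [hmapin, PySem.Dict.getD_foldl_insert_add_one]
    simp [pvAllWords, pvWordsOf, List.count_append]
    ring

theorem pv_countP_or_disjoint {α : Type} (p q : α → Bool)
    (h : ∀ x, ¬(p x = true ∧ q x = true)) (l : List α) :
    l.countP (fun x => p x || q x) = l.countP p + l.countP q := by
  induction l with
  | nil => simp
  | cons x l ih =>
    simp only [List.countP_cons, ih]
    by_cases hp : p x = true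
    · have hq : q x = false := by
        cases hq : q x
        · rfl
        · exact absurd ⟨hp, hq⟩ (h x)
      simp [hp, hq]; omega
    · simp at hp
      simp [hp]; omega

/-- summing multiplicities over a duplicate-free set equals counting members. -/
theorem pv_sum_counts (l : List String) (S : List String) (hnd : S.Nodup) :
    (S.map (fun w => (l.count w : Int))).sum
      = ((l.countP (fun x => S.contains x)) : Int) := by
  induction S with
  | nil => simp
  | cons w S ih =>
    have hw : w ∉ S := (List.nodup_cons.mp hnd).1
    have hnd' : S.Nodup := (List.nodup_cons.mp hnd).2
    have hsplit : l.countP (fun x => (w :: S).contains x)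
        = l.countP (fun x => x == w) + l.countP (fun x => S.contains x) := by
      have := pv_countP_or_disjoint (fun x => x == w) (fun x => S.contains x)
        (by
          intro x hx
          rcases hx with ⟨h1, h2⟩
          have : x = w := by simpa using h1
          subst this
          exact hw (by simpa using h2)) l
      rw [← this]
      apply List.countP_congr
      intro x _
      simp
    rw [List.map_cons, List.sum_cons, ih hnd', hsplit]
    have hc : l.countP (fun x => x == w) = l.count w := rfl
    rw [hc]
    push_cast
    ring

-- ===== VERDICT (by name: the statement is the Claim_ definition above) =====
theorem count_bad_words_spec : Claim_equal_count_bad_words := by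
  intro ls ps _
  unfold Spec_count_bad_words count_bad_words count_bad_words_alt
  simp only []
  rw [pvA_loop]
  rw [PySem.List.foldl_add]
  have hmap : (PySem.Set.ofList (ps.map (fun p => PySem.Str.lower p))).map
      (fun w => ((ls.foldl (fun freq line =>
        (PySem.Str.split₀ (PySem.Str.lower line)).foldl (fun freq word =>
          let cleaned := PySem.Str.stripChars word ".,!?;:()\"'"
          freq.insert cleaned (freq.getD cleaned 0 + 1)) freq) PySem.Dict.empty).getD w 0))
      = (PySem.Set.ofList (ps.map (fun p => PySem.Str.lower p))).map
          (fun w => ((pvAllWords ls).count w : Int)) := by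
    apply List.map_congr_left
    intro w _
    rw [pvB_freq]
    simp [PySem.Dict.getD_empty]
  rw [hmap, pv_sum_counts _ _ (PySem.Set.nodup_ofList _)]
  have hcongr : (pvAllWords ls).countP
      (fun x => PySem.Set.contains (PySem.Set.ofList (ps.map (fun word => PySem.Str.lower word))) x)
      = (pvAllWords ls).countP
      (fun x => List.contains (PySem.Set.ofList (ps.map (fun p => PySem.Str.lower p))) x) := by
    apply List.countP_congr
    intro x _
    simp [PySem.Set.contains]
  rw [hcongr]
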